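-- pv_equiv track=rewrite | github.com/marcbaetica/Personal-Password-Manager | test_code/utils.py | parse_credentials
-- ===== SOURCE A (Python) =====
-- def parse_credentials(credentials):
--     """Takes credentials and parses them."""
--     site, user, password = None, None, None
--     for cred in credentials:
--         site = cred['site'] if 'site' in cred.keys() else site
--         user = cred['user'] if 'user' in cred.keys() else user
--         password = cred['pass'] if 'pass' in cred.keys() else password
--     if not password:  # Credentials for deletion query don't contain passwords.
--         return site, user
--     return site, user, password
-- ===== SOURCE B (Python) =====
-- def parse_credentials(credentials):
--     """Takes credentials and parses them."""
--     def last_value(key):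
--         # first occurrence in reverse order = last occurrence in forward order
--         for cred in reversed(credentials):
--             if key in cred:
--                 return cred[key]
--         return None
--     site = last_value('site')
--     user = last_value('user')
--     password = last_value('pass')
--     if not password:  # Credentials for deletion query don't contain passwords.
--         return site, user
--     return site, user, password
-- ===== Notes on version B (the rewrite author's own statement) =====
-- stated objective: alternative
-- what changed: B replaces A's single forward pass that maintains three conditionally-reassigned accumulator variables by three independent backward scans, each returning the first (i.e. last forward) occurrence of its key with early exit and no loop state at all.
import Mathlib
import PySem

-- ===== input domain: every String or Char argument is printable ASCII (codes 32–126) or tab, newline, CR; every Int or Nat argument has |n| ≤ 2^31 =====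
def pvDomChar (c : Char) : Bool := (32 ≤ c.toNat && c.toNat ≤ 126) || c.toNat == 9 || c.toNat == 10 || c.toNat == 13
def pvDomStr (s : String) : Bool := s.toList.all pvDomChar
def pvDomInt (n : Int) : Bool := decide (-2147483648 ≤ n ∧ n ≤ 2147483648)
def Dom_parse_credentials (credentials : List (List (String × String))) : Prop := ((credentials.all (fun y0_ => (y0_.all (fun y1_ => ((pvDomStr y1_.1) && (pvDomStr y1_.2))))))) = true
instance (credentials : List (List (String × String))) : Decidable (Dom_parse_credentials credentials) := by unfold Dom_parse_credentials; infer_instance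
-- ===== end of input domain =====

-- B scans the list backwards per key, returning the first hit (= last forward occurrence) with no
-- accumulated state, instead of A's forward pass over three conditionally-reassigned variables.

-- ===== PORT A =====
def credStepA (st : Option String × Option String × Option String)
    (cred : List (String × String)) : Option String × Option String × Option String :=
  let d := PySem.Dict.mk cred
  (if d.contains "site" then d.get? "site" else st.1,
   if d.contains "user" then d.get? "user" else st.2.1,
   if d.contains "pass" then d.get? "pass" else st.2.2)

def parse_credentials (credentials : List (List (String × String))) : List (Option String) :=
  let st := credentials.foldl credStepA (none, none, none)
  if st.2.2 == none || st.2.2 == some "" then [st.1, st.2.1] else [st.1, st.2.1, st.2.2]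

-- ===== PORT B =====
-- last_value(key): walk reversed(credentials); first cred containing key yields cred[key]; else None
def lastValueB (credentials : List (List (String × String))) (key : String) : Option String :=
  match credentials.reverse.find? (fun cred => (PySem.Dict.mk cred).contains key) with
  | some cred => (PySem.Dict.mk cred).get? key
  | none => none

def parse_credentials_alt (credentials : List (List (String × String))) : List (Option String) :=
  let site := lastValueB credentials "site"
  let user := lastValueB credentials "user"
  let pass := lastValueB credentials "pass"
  if pass == none || pass == some "" then [site, user] else [site, user, pass]

-- ===== PRECONDITION & SPEC =====
def Spec_parse_credentials (credentials : List (List (String × String))) (out : List (Option String)) : Prop := out = parse_credentials_alt credentials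
instance (credentials : List (List (String × String))) (out : List (Option String)) : Decidable (Spec_parse_credentials credentials out) := by unfold Spec_parse_credentials; infer_instance

-- ===== CLAIM (what is proved, stated in full; the proofs are below) =====
def Claim_equal_parse_credentials : Prop := ∀ (credentials : List (List (String × String))), Dom_parse_credentials credentials → Spec_parse_credentials credentials (parse_credentials credentials)

-- ===== LEMMAS AND PROOFS =====

-- generalisation of lastValueB with a default for the not-found case
def lastAux (credentials : List (List (String × String))) (key : String) (d : Option String) : Option String :=
  match credentials.reverse.find? (fun cred => (PySem.Dict.mk cred).contains key) with
  | some cred => (PySem.Dict.mk cred).get? key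
  | none => d

theorem lastAux_cons (c : List (String × String)) (t : List (List (String × String)))
    (key : String) (d : Option String) :
    lastAux (c :: t) key d =
      lastAux t key (if (PySem.Dict.mk c).contains key then (PySem.Dict.mk c).get? key else d) := by
  simp only [lastAux, List.reverse_cons, List.find?_append]
  cases h : t.reverse.find? (fun cred => (PySem.Dict.mk cred).contains key) with
  | some cred => simp [h]
  | none =>
      cases hc : (PySem.Dict.mk c).contains key with
      | true => simp [h, List.find?, hc]
      | false => simp [h, List.find?, hc]

-- loop invariant: A's scalar triple is the three reverse-scan reads, the state being the default
theorem fold_invariant (credentials : List (List (String × String)))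
    (st : Option String × Option String × Option String) :
    credentials.foldl credStepA st =
      (lastAux credentials "site" st.1, lastAux credentials "user" st.2.1,
       lastAux credentials "pass" st.2.2) := by
  induction credentials generalizing st with
  | nil => simp [lastAux]
  | cons c t ih =>
    simp only [List.foldl_cons, ih, credStepA, lastAux_cons]

-- ===== VERDICT (by name: the statement is the Claim_ definition above) =====
theorem parse_credentials_spec : Claim_equal_parse_credentials := by
  intro credentials _
  unfold Spec_parse_credentials parse_credentials parse_credentials_alt
  rw [fold_invariant]
  rfl
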